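-- pv_equiv track=rewrite | github.com/andrew-healey/autodistill-seggpt | autodistill_seggpt/find_best_examples.py | combo_hash_to_choices
-- ===== SOURCE A (Python) =====
-- from typing import List,Type
--
-- def combo_hash_to_choices(fact:int,candidates:List[any],num_choices:int)->List[any]:
--     chosen = []
--     curr_fact = fact
--     remaining_candidates = candidates
--     for i in range(num_choices,0,-1):
--         which_remaining_candidate = curr_fact%i
--         chosen.append(remaining_candidates.pop(which_remaining_candidate))
--         curr_fact = curr_fact//i
--     return chosen
-- ===== SOURCE B (Python) =====
-- def combo_hash_to_choices(fact, candidates, num_choices):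
--     # Order-statistics over a fixed used-mask: candidates is never copied or
--     # mutated; each step selects the d-th not-yet-used original index by
--     # scanning the boolean mask.
--     used = [False] * len(candidates)
--     chosen = []
--     f = fact
--     for i in range(num_choices, 0, -1):
--         d = f % i
--         f //= i
--         j = 0
--         while used[j] or d > 0:
--             if not used[j]:
--                 d -= 1
--             j += 1
--         used[j] = True
--         chosen.append(candidates[j])
--     return chosen
-- ===== Notes on version B (the rewrite author's own statement) =====
-- stated objective: alternative
-- what changed: A destructively pops the d-th element from a shrinking list each step; B never mutates or copies candidates: it keeps a boolean used-mask over the original indices and selects the d-th not-yet-used index by an order-statistics scan of the mask.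
import Mathlib
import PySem

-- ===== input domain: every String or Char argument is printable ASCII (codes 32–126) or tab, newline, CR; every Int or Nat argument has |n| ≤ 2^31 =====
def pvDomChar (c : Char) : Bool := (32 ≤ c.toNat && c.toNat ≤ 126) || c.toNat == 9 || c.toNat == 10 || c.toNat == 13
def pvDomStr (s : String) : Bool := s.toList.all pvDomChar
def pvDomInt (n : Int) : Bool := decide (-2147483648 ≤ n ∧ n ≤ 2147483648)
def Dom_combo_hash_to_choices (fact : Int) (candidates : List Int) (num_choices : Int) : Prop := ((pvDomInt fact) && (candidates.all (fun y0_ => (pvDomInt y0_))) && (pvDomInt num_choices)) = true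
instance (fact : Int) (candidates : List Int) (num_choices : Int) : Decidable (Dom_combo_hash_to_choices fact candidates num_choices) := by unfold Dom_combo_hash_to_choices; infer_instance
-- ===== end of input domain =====

-- B replaces A's destructive pop-from-a-shrinking-list with a boolean used-mask over the fixed
-- candidate list and an order-statistics scan for the d-th unused index; objective: alternative.
-- A pops from `candidates` in place, B does not mutate it — the equivalence proved here is about
-- the RETURN value only.

-- ===== PORT A =====
-- one iteration of A's loop: state = (chosen, curr_fact, remaining_candidates)
def comboStepA (st : List Int × Int × List Int) (i : Int) : List Int × Int × List Int :=
  match PySem.List.pop? st.2.2 (PySem.Int.mod st.2.1 i) with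
  | some (x, rem') => (st.1 ++ [x], PySem.Int.floordiv st.2.1 i, rem')
  | none => st  -- Python raises IndexError here; excluded by Pre_

def combo_hash_to_choices (fact : Int) (candidates : List Int) (num_choices : Int) : List Int :=
  ((PySem.List.pyRange num_choices 0 (-1)).foldl comboStepA ([], fact, candidates)).1

-- ===== PORT B =====
-- Source B's inner while loop: advance j while used[j] or d > 0, decrementing d on unused slots
def comboScan : List Bool → Int → Nat → Option Nat
  | [], _, _ => none  -- used[j] out of range: Python raises IndexError; excluded by Pre_
  | u :: rest, d, j =>
    if u || 0 < d then comboScan rest (if u then d else d - 1) (j + 1)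
    else some j

-- one iteration of Source B's for loop: state = (chosen, f, used)
def comboStepB (cands : List Int) (st : List Int × Int × List Bool) (i : Int) : List Int × Int × List Bool :=
  let d := PySem.Int.mod st.2.1 i
  let f' := PySem.Int.floordiv st.2.1 i
  match comboScan st.2.2 d 0 with
  | some j =>
    match PySem.List.pyGet? cands (j : Int) with
    | some x => (st.1 ++ [x], f', st.2.2.set j true)
    | none => st  -- unreachable: comboScan returns only in-range indices
  | none => st  -- Python raises IndexError here; excluded by Pre_

def combo_hash_to_choices_alt (fact : Int) (candidates : List Int) (num_choices : Int) : List Int :=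
  ((PySem.List.pyRange num_choices 0 (-1)).foldl (comboStepB candidates)
    ([], fact, List.replicate candidates.length false)).1

-- ===== PRECONDITION & SPEC =====
-- A pops num_choices times from candidates, so it raises IndexError exactly when
-- num_choices > len(candidates); those inputs (and only those) are excluded.
def Pre_combo_hash_to_choices (fact : Int) (candidates : List Int) (num_choices : Int) : Prop :=
  num_choices ≤ (candidates.length : Int)
instance (fact : Int) (candidates : List Int) (num_choices : Int) : Decidable (Pre_combo_hash_to_choices fact candidates num_choices) := by unfold Pre_combo_hash_to_choices; infer_instance

def pvWitness_combo_hash_to_choices : Int × List Int × Int := (3, [10, 20, 30], 2)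

def Spec_combo_hash_to_choices (fact : Int) (candidates : List Int) (num_choices : Int) (out : List Int) : Prop := out = combo_hash_to_choices_alt fact candidates num_choices
instance (fact : Int) (candidates : List Int) (num_choices : Int) (out : List Int) : Decidable (Spec_combo_hash_to_choices fact candidates num_choices out) := by unfold Spec_combo_hash_to_choices; infer_instance

-- ===== CLAIM (what is proved, stated in full; the proofs are below) =====
def Claim_equal_combo_hash_to_choices : Prop := ∀ (fact : Int) (candidates : List Int) (num_choices : Int), Dom_combo_hash_to_choices fact candidates num_choices → Pre_combo_hash_to_choices fact candidates num_choices → Spec_combo_hash_to_choices fact candidates num_choices (combo_hash_to_choices fact candidates num_choices)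

-- ===== LEMMAS AND PROOFS =====

-- the sublist of xs at positions the mask marks unused (A's remaining_candidates)
def maskFilter : List Int → List Bool → List Int
  | [], _ => []
  | _ :: _, [] => []
  | x :: xs, u :: us => if u then maskFilter xs us else x :: maskFilter xs us

lemma maskFilter_replicate (xs : List Int) : maskFilter xs (List.replicate xs.length false) = xs := by
  induction xs with
  | nil => rfl
  | cons x xs ih => simp [maskFilter, List.replicate, ih]

lemma comboScan_shift (mask : List Bool) : ∀ (d : Int) (j : Nat),
    comboScan mask d j = (comboScan mask d 0).map (· + j) := by
  induction mask with
  | nil => intro d j; rfl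
  | cons u rest ih =>
    intro d j
    simp only [comboScan]
    by_cases h : (u || decide (0 < d)) = true
    · simp only [h, if_true]
      rw [ih _ (j + 1), ih _ 1, Option.map_map]
      cases comboScan rest (if u then d else d - 1) 0 with
      | none => rfl
      | some v => simp; omega
    · simp [h]

-- core correspondence: selecting the k-th unused index via the mask scan matches
-- indexing / erasing in the filtered list
lemma scan_spec : ∀ (mask : List Bool) (xs : List Int) (k : Nat)
    (_ : mask.length = xs.length) (hk : k < (maskFilter xs mask).length),
    ∃ j, comboScan mask (k : Int) 0 = some j ∧
      PySem.List.pyGet? xs (j : Int) = some ((maskFilter xs mask)[k]'hk) ∧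
      maskFilter xs (mask.set j true) = (maskFilter xs mask).eraseIdx k ∧
      (mask.set j true).length = mask.length := by
  intro mask
  induction mask with
  | nil =>
    intro xs k hlen hk
    cases xs with
    | nil => simp [maskFilter] at hk
    | cons x xs => simp at hlen
  | cons u us ih =>
    intro xs k hlen hk
    cases xs with
    | nil => simp at hlen
    | cons x xs' =>
      simp only [List.length_cons, Nat.add_right_cancel_iff] at hlen
      cases u with
      | true =>
        have hk' : k < (maskFilter xs' us).length := by simpa [maskFilter] using hk
        obtain ⟨j, hscan, hget, herase, hlen2⟩ := ih xs' k hlen hk'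
        refine ⟨j + 1, ?_, ?_, ?_, ?_⟩
        · simp only [comboScan, Bool.true_or, if_true]
          rw [comboScan_shift, hscan]; rfl
        · have : ((j : Int) + 1) = ((j + 1 : Nat) : Int) := by push_cast; ring
          rw [show ((j + 1 : Nat) : Int) = (j : Int) + 1 by push_cast; ring] at *
          simp only [PySem.List.pyGet?_natCast] at hget ⊢
          rw [show (j : Int) + 1 = ((j + 1 : Nat) : Int) by push_cast; ring,
            PySem.List.pyGet?_natCast]
          simpa [maskFilter] using hget
        · simpa [List.set, maskFilter] using herase
        · simp [hlen2]
      | false =>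
        cases k with
        | zero =>
          refine ⟨0, ?_, ?_, ?_, by simp⟩
          · simp [comboScan]
          · simp [maskFilter]
          · simp [List.set, maskFilter]
        | succ k' =>
          have hk' : k' < (maskFilter xs' us).length := by
            simp [maskFilter] at hk; omega
          obtain ⟨j, hscan, hget, herase, hlen2⟩ := ih xs' k' hlen hk'
          refine ⟨j + 1, ?_, ?_, ?_, ?_⟩
          · simp only [comboScan, Bool.false_or]
            rw [if_pos (by simp),
              show ((k' + 1 : Nat) : Int) - 1 = (k' : Int) by push_cast; ring]
            simp only [Bool.false_eq_true, if_false]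
            rw [comboScan_shift, hscan]; rfl
          · rw [show ((j + 1 : Nat) : Int) = (j : Int) + 1 by push_cast; ring] at *
            simp only [PySem.List.pyGet?_natCast] at hget ⊢
            rw [show (j : Int) + 1 = ((j + 1 : Nat) : Int) by push_cast; ring,
              PySem.List.pyGet?_natCast]
            simpa [maskFilter] using hget
          · simpa [List.set, maskFilter, List.eraseIdx] using herase
          · simp [hlen2]

lemma main_lemma (xs : List Int) : ∀ (n : Nat) (cf : Int) (mask : List Bool) (chosen : List Int),
    mask.length = xs.length → n ≤ (maskFilter xs mask).length →
    ((PySem.List.pyRange (n : Int) 0 (-1)).foldl comboStepA (chosen, cf, maskFilter xs mask)).1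
      = ((PySem.List.pyRange (n : Int) 0 (-1)).foldl (comboStepB xs) (chosen, cf, mask)).1 := by
  intro n
  induction n with
  | zero =>
    intro cf mask chosen _ _
    rw [show ((0 : Nat) : Int) = 0 by rfl, PySem.List.pyRange_neg_one_eq_nil (le_refl 0)]
    rfl
  | succ m ih =>
    intro cf mask chosen hlen hn
    have hpos : (0 : Int) < (m : Int) + 1 := by positivity
    rw [show ((m + 1 : Nat) : Int) = (m : Int) + 1 by push_cast; ring,
        PySem.List.pyRange_neg_one_cons (by positivity)]
    simp only [List.foldl_cons, add_sub_cancel_right]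
    have hd0 : 0 ≤ PySem.Int.mod cf ((m : Int) + 1) := PySem.Int.mod_nonneg cf hpos
    have hdlt : PySem.Int.mod cf ((m : Int) + 1) < (m : Int) + 1 := PySem.Int.mod_lt cf hpos
    obtain ⟨k, hk⟩ : ∃ k : Nat, PySem.Int.mod cf ((m : Int) + 1) = (k : Int) :=
      ⟨(PySem.Int.mod cf ((m : Int) + 1)).toNat, by omega⟩
    have hklt : k < (maskFilter xs mask).length := by omega
    obtain ⟨j, hscan, hget, herase, hlen2⟩ := scan_spec mask xs k hlen hklt
    have hstepA : comboStepA (chosen, cf, maskFilter xs mask) ((m : Int) + 1)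
        = (chosen ++ [(maskFilter xs mask)[k]], PySem.Int.floordiv cf ((m : Int) + 1),
           (maskFilter xs mask).eraseIdx k) := by
      unfold comboStepA
      simp only [hk]
      rw [PySem.List.pop?_natCast _ _ hklt]
    have hstepB : comboStepB xs (chosen, cf, mask) ((m : Int) + 1)
        = (chosen ++ [(maskFilter xs mask)[k]], PySem.Int.floordiv cf ((m : Int) + 1),
           mask.set j true) := by
      unfold comboStepB
      simp only [hk, hscan, hget]
    rw [hstepA, hstepB]
    have hlen' : (mask.set j true).length = xs.length := by rw [hlen2, hlen]
    have hn' : m ≤ (maskFilter xs (mask.set j true)).length := by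
      rw [herase, List.length_eraseIdx_of_lt hklt]; omega
    have := ih (PySem.Int.floordiv cf ((m : Int) + 1)) (mask.set j true)
      (chosen ++ [(maskFilter xs mask)[k]]) hlen' hn'
    rw [herase] at this
    exact this

-- ===== VERDICT (by name: the statement is the Claim_ definition above) =====
theorem combo_hash_to_choices_spec : Claim_equal_combo_hash_to_choices := by
  intro fact candidates num_choices _ hpre
  unfold Spec_combo_hash_to_choices combo_hash_to_choices combo_hash_to_choices_alt
  by_cases h0 : 0 ≤ num_choices
  · have hn : num_choices = ((num_choices.toNat : Nat) : Int) := by omega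
    rw [hn]
    have hlen : (List.replicate candidates.length false).length = candidates.length := by simp
    have hle : num_choices.toNat ≤ (maskFilter candidates (List.replicate candidates.length false)).length := by
      rw [maskFilter_replicate]
      unfold Pre_combo_hash_to_choices at hpre; omega
    have := main_lemma candidates num_choices.toNat fact
      (List.replicate candidates.length false) [] hlen hle
    rw [maskFilter_replicate] at this
    exact this
  · rw [PySem.List.pyRange_neg_one_eq_nil (by omega)]
    rfl
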